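-- pv_equiv track=rewrite | github.com/robz-tirtlib/adventofcode | 2023/Day_09/09_Mirage_Maintenance.py | calc_diffs_lists
-- ===== SOURCE A (Python) =====
-- def calc_diffs_lists(lst: list[int]) -> list[list[int]]:
--     lists = [lst]
--
--     while True:
--         diffs = []
--         all_zero = True
--
--         for i in range(1, len(lists[-1])):
--             diff = lists[-1][i] - lists[-1][i - 1]
--
--             if diff != 0:
--                 all_zero = False
--
--             diffs.append(diff)
--
--         if all_zero:
--             break
--
--         lists.append(diffs)
--
--     return lists
-- ===== SOURCE B (Python) =====
-- def calc_diffs_lists(lst: list[int]) -> list[list[int]]: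
--     diffs = [y - x for x, y in zip(lst, lst[1:])]
--     if any(d != 0 for d in diffs):
--         return [lst] + calc_diffs_lists(diffs)
--     return [lst]
-- ===== Notes on version B (the rewrite author's own statement) =====
-- stated objective: simpler
-- what changed: Replaced the imperative while-loop that grows an explicit list-of-lists (indexing lists[-1] each round with a mutable all_zero flag) by a direct recursion on the difference table, with the differences computed by zipping the list against its own tail instead of index arithmetic.
import Mathlib
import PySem

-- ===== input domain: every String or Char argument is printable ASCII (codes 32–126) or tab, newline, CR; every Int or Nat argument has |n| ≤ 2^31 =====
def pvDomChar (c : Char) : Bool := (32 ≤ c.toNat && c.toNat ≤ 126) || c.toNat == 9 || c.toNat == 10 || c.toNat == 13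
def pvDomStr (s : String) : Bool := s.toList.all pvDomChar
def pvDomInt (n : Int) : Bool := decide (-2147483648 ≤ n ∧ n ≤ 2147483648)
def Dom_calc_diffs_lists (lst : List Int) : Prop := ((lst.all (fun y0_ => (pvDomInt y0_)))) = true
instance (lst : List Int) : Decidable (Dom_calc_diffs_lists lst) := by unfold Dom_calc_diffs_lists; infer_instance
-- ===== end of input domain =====

-- B replaces A's imperative while-loop (explicit list-of-lists, lists[-1] index arithmetic, mutable
-- all_zero flag) by a direct recursion on the zip-against-tail difference list; objective: simpler.

-- ===== PORT A =====
-- one iteration of A's inner `for i in range(1, len(lists[-1]))`: state = (diffs, all_zero)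
def pvStepA (cur : List Int) (st : List Int × Bool) (i : Int) : List Int × Bool :=
  let diff := PySem.List.pyGetD cur i 0 - PySem.List.pyGetD cur (i - 1) 0
  (st.1 ++ [diff], if diff ≠ 0 then false else st.2)

-- A's full inner for-loop on the current last row
def pvRoundA (cur : List Int) : List Int × Bool :=
  (PySem.List.pyRange 1 (cur.length : Int) 1).foldl (pvStepA cur) ([], true)

-- the value of A's diffs list after the inner loop (proof-side characterisation, cited by
-- pvLoopA's decreasing_by)
def pvDiffsOf (lst : List Int) : List Int :=
  (PySem.List.pyRange 1 (lst.length : Int) 1).map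
    (fun i => PySem.List.pyGetD lst i 0 - PySem.List.pyGetD lst (i - 1) 0)

-- characterisation of A's inner loop (cited by pvLoopA's decreasing_by)
theorem pvFoldA_spec (cur : List Int) (idxs : List Int) (ds : List Int) (b : Bool) :
    idxs.foldl (pvStepA cur) (ds, b) =
      (ds ++ idxs.map (fun i => PySem.List.pyGetD cur i 0 - PySem.List.pyGetD cur (i - 1) 0),
       b && (idxs.map (fun i => PySem.List.pyGetD cur i 0 - PySem.List.pyGetD cur (i - 1) 0)).all (· == 0)) := by
  induction idxs generalizing ds b with
  | nil => simp
  | cons i rest ih =>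
      simp only [List.foldl_cons, pvStepA, List.map_cons, List.all_cons]
      rw [ih]
      by_cases hd : PySem.List.pyGetD cur i 0 - PySem.List.pyGetD cur (i - 1) 0 = 0 <;>
        simp [hd, List.append_assoc]

theorem pvRoundA_eq (cur : List Int) :
    pvRoundA cur = (pvDiffsOf cur, (pvDiffsOf cur).all (· == 0)) := by
  rw [pvRoundA, pvFoldA_spec]
  simp [pvDiffsOf]

theorem pvDiffsOf_length (lst : List Int) : (pvDiffsOf lst).length = lst.length - 1 := by
  simp [pvDiffsOf, PySem.List.length_pyRange_one]

-- cited by pvLoopA's decreasing_by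
theorem pvDiffsOf_lt (lst : List Int) (h : ¬ (pvDiffsOf lst).all (· == 0) = true) :
    (pvDiffsOf lst).length < lst.length := by
  have hlen := pvDiffsOf_length lst
  rcases Nat.eq_zero_or_pos lst.length with h0 | h0
  · exfalso
    apply h
    have : (pvDiffsOf lst).length = 0 := by omega
    simp [List.length_eq_zero_iff.mp this]
  · omega

-- A's while-loop; `cur` carries the value of lists[-1]
def pvLoopA (lists : List (List Int)) (cur : List Int) : List (List Int) :=
  if (pvRoundA cur).2 then lists
  else pvLoopA (lists ++ [(pvRoundA cur).1]) (pvRoundA cur).1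
termination_by cur.length
decreasing_by
  rw [pvRoundA_eq]
  exact pvDiffsOf_lt cur (by simpa [pvRoundA_eq] using ‹¬ (pvRoundA cur).2 = true›)

def calc_diffs_lists (lst : List Int) : List (List Int) := pvLoopA [lst] lst

-- ===== PORT B =====
-- zip(lst, lst[1:]) with the subtraction mapped over it
def pvDiffsB (lst : List Int) : List Int :=
  List.zipWith (fun x y => y - x) lst lst.tail

-- cited by calc_diffs_lists_alt's decreasing_by
theorem pvDiffsB_lt (lst : List Int) (h : (pvDiffsB lst).any (fun d => d != 0) = true) :
    (pvDiffsB lst).length < lst.length := by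
  have hne : pvDiffsB lst ≠ [] := by
    intro hnil; rw [hnil] at h; simp at h
  have hpos : 0 < (pvDiffsB lst).length := List.length_pos_iff.mpr hne
  have : (pvDiffsB lst).length ≤ lst.tail.length := by
    simp [pvDiffsB]
  have := lst.length_tail
  omega

def calc_diffs_lists_alt (lst : List Int) : List (List Int) :=
  if h : (pvDiffsB lst).any (fun d => d != 0) then
    lst :: calc_diffs_lists_alt (pvDiffsB lst)
  else [lst]
termination_by lst.length
decreasing_by exact pvDiffsB_lt lst h

-- ===== PRECONDITION & SPEC =====
def Spec_calc_diffs_lists (lst : List Int) (out : List (List Int)) : Prop := out = calc_diffs_lists_alt lst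
instance (lst : List Int) (out : List (List Int)) : Decidable (Spec_calc_diffs_lists lst out) := by unfold Spec_calc_diffs_lists; infer_instance

-- ===== CLAIM (what is proved, stated in full; the proofs are below) =====
def Claim_equal_calc_diffs_lists : Prop := ∀ (lst : List Int), Dom_calc_diffs_lists lst → Spec_calc_diffs_lists lst (calc_diffs_lists lst)

-- ===== LEMMAS AND PROOFS =====
-- the two diff computations agree
theorem pvDiffsB_eq (lst : List Int) : pvDiffsB lst = pvDiffsOf lst := by
  apply List.ext_getElem
  · rw [pvDiffsOf_length]
    simp [pvDiffsB]
  · intro k hk hk'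
    have hkl : k + 1 < lst.length := by
      have := pvDiffsOf_length lst; omega
    simp only [pvDiffsB, List.getElem_zipWith, pvDiffsOf, List.getElem_map,
      PySem.List.getElem_pyRange_one]
    have h1 : (1 : Int) + k = ((k + 1 : Nat) : Int) := by push_cast; ring
    rw [h1]
    rw [show ((k + 1 : Nat) : Int) - 1 = ((k : Nat) : Int) by push_cast; ring]
    rw [PySem.List.pyGetD_natCast, PySem.List.pyGetD_natCast]
    simp [List.getElem_tail, List.getD_eq_getElem?_getD, List.getElem?_eq_getElem hkl,
      List.getElem?_eq_getElem (by omega : k < lst.length)]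

-- the condition of B's branch is the negation of A's all-zero flag
theorem pvAnyB_iff (lst : List Int) :
    (pvDiffsB lst).any (fun d => d != 0) = !(pvDiffsOf lst).all (· == 0) := by
  rw [pvDiffsB_eq]
  generalize pvDiffsOf lst = ds
  induction ds with
  | nil => simp
  | cons d rest ih =>
      simp only [List.any_cons, List.all_cons, Bool.not_and, ih]
      cases h0 : (d == 0) <;> simp [bne, h0]

theorem alt_head (lst : List Int) :
    calc_diffs_lists_alt lst = lst :: (calc_diffs_lists_alt lst).tail := by
  rw [calc_diffs_lists_alt]
  split <;> simp

theorem loop_eq (cur : List Int) (acc : List (List Int)) :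
    pvLoopA acc cur = acc ++ (calc_diffs_lists_alt cur).tail := by
  rw [pvLoopA, pvRoundA_eq]
  by_cases h : (pvDiffsOf cur).all (· == 0)
  · rw [calc_diffs_lists_alt]
    simp [pvAnyB_iff, h]
  · simp only [h, if_neg, Bool.false_eq_true, not_false_eq_true]
    rw [loop_eq (pvDiffsOf cur) (acc ++ [pvDiffsOf cur])]
    have hx : (pvDiffsB cur).any (fun d => d != 0) = true := by
      rw [pvAnyB_iff]; simp [h]
    conv_rhs => rw [calc_diffs_lists_alt]
    rw [dif_pos hx, alt_head (pvDiffsB cur), pvDiffsB_eq]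
    simp
termination_by cur.length
decreasing_by exact pvDiffsOf_lt cur h

-- ===== VERDICT (by name: the statement is the Claim_ definition above) =====
theorem calc_diffs_lists_spec : Claim_equal_calc_diffs_lists := by
  intro lst _
  unfold Spec_calc_diffs_lists calc_diffs_lists
  rw [loop_eq]
  conv_rhs => rw [alt_head lst]
  simp
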